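-- pv_equiv track=rewrite | github.com/Ch-Hyuk/Algorithm-Study | 프로그래머스/인사고과.py | solution
-- ===== SOURCE A (Python) =====
-- def solution(scores):
--     answer = 1
--     wanho = scores[0]
--     scores.sort(key=lambda n: (-n[0], n[1]))
--     max_score = 0
--     for data in scores:
--         if data[0] > wanho[0] and data[1] > wanho[1]:
--             return -1
--
--         if max_score <= data[1]:
--             max_score = data[1]
--             if sum(data) > sum(wanho):
--                 answer += 1
--
--     return answer
-- ===== SOURCE B (Python) =====
-- # Same return values as A (and the same in-place sort of `scores`), except on
-- # inputs where a qualifying row has negative second score (see claim); B counts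
-- # by an explicit whole-list domination scan instead of A's running-max pass.
-- def solution(scores):
--     wanho = scores[0]
--     scores.sort(key=lambda n: (-n[0], n[1]))
--     if any(d[0] > wanho[0] and d[1] > wanho[1] for d in scores):
--         return -1
--     target = sum(wanho)
--     answer = 1
--     for d in scores:
--         if sum(d) > target and not any(e[0] > d[0] and e[1] > d[1] for e in scores):
--             answer += 1
--     return answer
-- ===== Notes on version B (the rewrite author's own statement) =====
-- stated objective: alternative
-- what changed: A's single pass with a running maximum of the second score over the sorted list is replaced by an explicit whole-list domination scan per row (count a row iff its sum beats the first row's and no row beats it in both components), which also fixes A's zero-initialised running max that silently skips qualifying rows with negative second score.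
-- intended difference: On inputs where no row beats scores[0] in both components but some row with negative second score has a larger sum than scores[0] and is dominated by no row, A's running max (initialised to 0, assuming non-negative scores) skips that row and returns a smaller count, while B counts it; B's count is the intended number of undominated higher-sum rows. — e.g. on solution([[0, -1], [2, -1]]): A returns 1, B returns 2
import Mathlib
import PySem

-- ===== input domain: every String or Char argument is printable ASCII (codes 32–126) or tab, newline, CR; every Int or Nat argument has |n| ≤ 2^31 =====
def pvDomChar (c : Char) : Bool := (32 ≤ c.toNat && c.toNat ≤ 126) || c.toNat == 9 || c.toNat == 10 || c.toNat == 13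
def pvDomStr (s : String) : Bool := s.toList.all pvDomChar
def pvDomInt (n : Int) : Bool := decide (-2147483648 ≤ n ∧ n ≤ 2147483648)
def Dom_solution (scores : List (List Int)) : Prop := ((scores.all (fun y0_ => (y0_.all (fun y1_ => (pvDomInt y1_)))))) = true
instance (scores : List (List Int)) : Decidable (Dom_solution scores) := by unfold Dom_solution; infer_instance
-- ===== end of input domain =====

-- B replaces A's running-max single pass by a whole-list domination scan (and fixes A's
-- miscount on rows with negative second score, see D_solution); both versions sort the
-- argument in place identically in Python — the equivalence proved here is about the
-- return value.

-- row accessors: n[0] and n[1] (rows have length ≥ 2 under Pre_solution)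
def px (l : List Int) : Int := PySem.List.pyGetD l 0 0
def py (l : List Int) : Int := PySem.List.pyGetD l 1 0

-- ===== PORT A =====
-- the for-loop of A, with its two early-return/branch structure
def solA_loop (wanho : List Int) (maxScore answer : Int) : List (List Int) → Int
  | [] => answer
  | data :: rest =>
    if px data > px wanho ∧ py data > py wanho then -1
    else if maxScore ≤ py data then
      solA_loop wanho (py data) (if data.sum > wanho.sum then answer + 1 else answer) rest
    else solA_loop wanho maxScore answer rest

def solution (scores : List (List Int)) : Int :=
  let wanho := PySem.List.pyGetD scores 0 []
  let s := PySem.List.sorted2 scores (fun n => -(px n)) py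
  solA_loop wanho 0 1 s

-- ===== PORT B =====
def solution_alt (scores : List (List Int)) : Int :=
  let wanho := PySem.List.pyGetD scores 0 []
  let s := PySem.List.sorted2 scores (fun n => -(px n)) py
  if ∃ d ∈ s, px d > px wanho ∧ py d > py wanho then -1
  else
    let target := wanho.sum
    s.foldl (fun answer d =>
      if d.sum > target ∧ ¬ ∃ e ∈ s, px e > px d ∧ py e > py d then answer + 1
      else answer) 1

-- ===== PRECONDITION & SPEC =====
-- Pre_ excludes exactly the inputs on which A raises IndexError: the empty list
-- (scores[0]) and rows shorter than 2 (n[0]/n[1] in the sort key and the loop).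
def Pre_solution (scores : List (List Int)) : Prop :=
  scores ≠ [] ∧ ∀ l ∈ scores, 2 ≤ l.length
instance (scores : List (List Int)) : Decidable (Pre_solution scores) := by
  unfold Pre_solution; infer_instance

def pvWitness_solution : List (List Int) := [[2, 2], [1, 4], [3, 2]]

-- On inputs where no row beats scores[0] in both components but some row with NEGATIVE
-- second score has a larger sum than scores[0] and is dominated by no row, A's running
-- max (initialised to 0, assuming non-negative scores) silently skips that row and
-- returns a smaller count, while B counts it; B's count is the intended one.
def D_solution (scores : List (List Int)) : Prop :=
  scores ≠ [] ∧
  (∀ d ∈ scores, ¬(px d > px scores.headI ∧ py d > py scores.headI)) ∧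
  ∃ d ∈ scores, py d < 0 ∧ d.sum > scores.headI.sum ∧
    ∀ e ∈ scores, ¬(px e > px d ∧ py e > py d)
instance (scores : List (List Int)) : Decidable (D_solution scores) := by
  unfold D_solution; infer_instance

def Spec_solution (scores : List (List Int)) (out : Int) : Prop :=
  ¬ D_solution scores → out = solution_alt scores
instance (scores : List (List Int)) (out : Int) : Decidable (Spec_solution scores out) := by
  unfold Spec_solution; infer_instance

def pvDiffWitness_solution : List (List Int) := [[0, -1], [2, -1]]
def pvDiffWitnessOut_solution : Int × Int := (1, 2)

-- ===== CLAIM (what is proved, stated in full; the proofs are below) =====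
def Claim_unchanged_solution : Prop := ∀ (scores : List (List Int)), Dom_solution scores → Pre_solution scores → Spec_solution scores (solution scores)
def Claim_changed_solution : Prop := Dom_solution (pvDiffWitness_solution) ∧ Pre_solution (pvDiffWitness_solution) ∧ D_solution (pvDiffWitness_solution) ∧ solution (pvDiffWitness_solution) = pvDiffWitnessOut_solution.1 ∧ solution_alt (pvDiffWitness_solution) = pvDiffWitnessOut_solution.2 ∧ pvDiffWitnessOut_solution.1 ≠ pvDiffWitnessOut_solution.2
def Claim_exact_solution : Prop := ∀ (scores : List (List Int)), Dom_solution scores → Pre_solution scores → D_solution scores → solution scores ≠ solution_alt scores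

-- ===== LEMMAS AND PROOFS =====

-- the (non-strict lexicographic) order sorted2 establishes, phrased on (px, py)
def keyLe (a b : List Int) : Prop := px b < px a ∨ (px a = px b ∧ py a ≤ py b)

lemma pairwise_insertBy {α : Type} (before : α → α → Bool)
    (hasym : ∀ a b, before a b = true → before b a = false)
    (htrans : ∀ a b c, before a b = true → before b c = true → before a c = true)
    (x : α) (acc : List α) (h : acc.Pairwise (fun a b => before b a = false)) :
    (PySem.List.insertBy before x acc).Pairwise (fun a b => before b a = false) := by
  induction acc with
  | nil => simp [PySem.List.insertBy]
  | cons y ys ih =>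
    rw [List.pairwise_cons] at h
    by_cases hxy : before x y = true
    · show List.Pairwise _ (if before x y = true then x :: y :: ys else _)
      rw [if_pos hxy, List.pairwise_cons]
      refine ⟨?_, List.pairwise_cons.mpr h⟩
      intro z hz
      rcases List.mem_cons.mp hz with rfl | hz
      · exact hasym _ _ hxy
      · by_contra hzx
        have hzx' : before z x = true := by
          cases hzx2 : before z x with
          | true => rfl
          | false => exact absurd hzx2 hzx
        have := htrans z x y hzx' hxy
        rw [h.1 z hz] at this
        exact Bool.false_ne_true this
    · show List.Pairwise _ (if before x y = true then x :: y :: ys else y :: PySem.List.insertBy before x ys)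
      rw [if_neg hxy, List.pairwise_cons]
      refine ⟨?_, ih h.2⟩
      intro z hz
      rcases (PySem.List.mem_insertBy before x z ys).mp hz with rfl | hz
      · exact Bool.not_eq_true _ |>.mp hxy
      · exact h.1 z hz

lemma pairwise_foldl_insertBy {α : Type} (before : α → α → Bool)
    (hasym : ∀ a b, before a b = true → before b a = false)
    (htrans : ∀ a b c, before a b = true → before b c = true → before a c = true) :
    ∀ (xs acc : List α), acc.Pairwise (fun a b => before b a = false) →
      (xs.foldl (fun acc x => PySem.List.insertBy before x acc) acc).Pairwise
        (fun a b => before b a = false)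
  | [], _, h => h
  | x :: xs, acc, h =>
    pairwise_foldl_insertBy before hasym htrans xs (PySem.List.insertBy before x acc)
      (pairwise_insertBy before hasym htrans x acc h)

lemma sorted2_pairwise_keyLe (xs : List (List Int)) :
    (PySem.List.sorted2 xs (fun n => -(px n)) py).Pairwise keyLe := by
  have h := pairwise_foldl_insertBy
    (fun a b => decide (-(px a) < -(px b)) || (!decide (-(px b) < -(px a)) && decide (py a < py b)))
    (by intro a b hab; simp at hab ⊢; omega)
    (by intro a b c hab hbc; simp at hab hbc ⊢; omega)
    xs [] (List.Pairwise.nil)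
  refine List.Pairwise.imp ?_ h
  intro a b hab
  simp only [keyLe]
  simp at hab
  omega

-- running max of A's loop over the processed prefix
def mrun (P : List (List Int)) : Int := P.foldl (fun m e => max m (py e)) 0

lemma mrun_append (P : List (List Int)) (d : List Int) :
    mrun (P ++ [d]) = max (mrun P) (py d) := by
  simp [mrun, List.foldl_append]

lemma foldl_max_mem_py : ∀ (P : List (List Int)) (a : Int),
    P.foldl (fun m e => max m (py e)) a = a ∨
      ∃ e ∈ P, P.foldl (fun m e => max m (py e)) a = py e
  | [], a => Or.inl rfl
  | p :: P, a => by
    rw [List.foldl_cons]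
    rcases foldl_max_mem_py P (max a (py p)) with h | ⟨e, he, h⟩
    · rcases max_choice a (py p) with hm | hm
      · exact Or.inl (h.trans hm)
      · exact Or.inr ⟨p, List.mem_cons_self, h.trans hm⟩
    · exact Or.inr ⟨e, List.mem_cons_of_mem _ he, h⟩

-- which rows of s are dominated, seen from A's split point s = P ++ d :: rest
lemma dom_iff (s P rest : List (List Int)) (d : List Int)
    (hs : s = P ++ d :: rest) (hpair : s.Pairwise keyLe) :
    (∃ e ∈ s, px e > px d ∧ py e > py d) ↔ ∃ e ∈ P, py d < py e := by
  subst hs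
  rw [List.pairwise_append] at hpair
  constructor
  · rintro ⟨e, he, hx, hy⟩
    rcases List.mem_append.mp he with heP | heR
    · exact ⟨e, heP, hy⟩
    · rcases List.mem_cons.mp heR with rfl | heR
      · omega
      · have := (List.pairwise_cons.mp hpair.2.1).1 e heR
        unfold keyLe at this; omega
  · rintro ⟨e, heP, hy⟩
    have hk := hpair.2.2 e heP d (List.mem_cons_self)
    unfold keyLe at hk
    exact ⟨e, List.mem_append_left _ heP, by omega, hy⟩

-- A's loop, characterised: starting from the running max of prefix P, it adds one
-- for exactly the undominated rows with larger sum and non-negative second score.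
lemma loopA_eq (w : List Int) (s : List (List Int))
    (hpair : s.Pairwise keyLe)
    (hw : ∀ d ∈ s, ¬(px d > px w ∧ py d > py w)) :
    ∀ (rest P : List (List Int)) (ans : Int), s = P ++ rest →
      solA_loop w (mrun P) ans rest
        = rest.foldl (fun a d =>
            if d.sum > w.sum ∧ ¬(∃ e ∈ s, px e > px d ∧ py e > py d) ∧ 0 ≤ py d
            then a + 1 else a) ans := by
  intro rest
  induction rest with
  | nil => intro P ans _; rfl
  | cons d r ih =>
    intro P ans hs
    have hdmem : d ∈ s := by rw [hs]; exact List.mem_append_right _ List.mem_cons_self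
    have h1 := hw d hdmem
    have hdomiff := dom_iff s P r d hs hpair
    have hmax := PySem.List.le_foldl_max_int P py 0
    have hnn : 0 ≤ mrun P := hmax.1
    have hub : ∀ e ∈ P, py e ≤ mrun P := hmax.2
    have hs' : s = (P ++ [d]) ++ r := by rw [hs, List.append_assoc]; rfl
    rw [List.foldl_cons]
    show (if px d > px w ∧ py d > py w then -1 else _) = _
    rw [if_neg h1]
    by_cases hms : mrun P ≤ py d
    · have hnd : ¬(∃ e ∈ s, px e > px d ∧ py e > py d) := by
        rw [hdomiff]; rintro ⟨e, he, hlt⟩; have := hub e he; omega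
      have h0 : 0 ≤ py d := le_trans hnn hms
      have hinit : (if d.sum > w.sum ∧ ¬(∃ e ∈ s, px e > px d ∧ py e > py d) ∧ 0 ≤ py d
          then ans + 1 else ans) = (if d.sum > w.sum then ans + 1 else ans) := by
        split_ifs <;> tauto
      rw [if_pos hms, hinit]
      have hm' : py d = mrun (P ++ [d]) := by rw [mrun_append, max_eq_right hms]
      rw [hm']
      exact ih (P ++ [d]) _ hs'
    · have hnd : ¬(d.sum > w.sum ∧ ¬(∃ e ∈ s, px e > px d ∧ py e > py d) ∧ 0 ≤ py d) := by
        rcases foldl_max_mem_py P 0 with hz | ⟨e, he, hpe⟩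
        · have : mrun P = 0 := hz
          intro hc; omega
        · have hdom : ∃ e ∈ s, px e > px d ∧ py e > py d := by
            rw [hdomiff]; exact ⟨e, he, by have : mrun P = py e := hpe; omega⟩
          intro hc; exact hc.2.1 hdom
      rw [if_neg hms, if_neg hnd]
      have hm' : mrun P = mrun (P ++ [d]) := by
        rw [mrun_append, max_eq_left (by omega)]
      rw [hm']
      exact ih (P ++ [d]) _ hs'

lemma loopA_neg1 (w : List Int) :
    ∀ (rest : List (List Int)) (ms ans : Int),
      (∃ d ∈ rest, px d > px w ∧ py d > py w) → solA_loop w ms ans rest = -1 := by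
  intro rest
  induction rest with
  | nil => rintro ms ans ⟨d, hd, _⟩; exact absurd hd (List.not_mem_nil)
  | cons d r ih =>
    rintro ms ans ⟨e, he, hx, hy⟩
    show (if px d > px w ∧ py d > py w then -1 else _) = -1
    by_cases hd : px d > px w ∧ py d > py w
    · rw [if_pos hd]
    · rw [if_neg hd]
      have her : e ∈ r := by
        rcases List.mem_cons.mp he with rfl | h
        · exact absurd ⟨hx, hy⟩ hd
        · exact h
      split_ifs <;> exact ih _ _ ⟨e, her, hx, hy⟩

lemma countP_lt_countP {α : Type} {l : List α} {p q : α → Bool}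
    (himp : ∀ a ∈ l, p a = true → q a = true) {d : α} (hd : d ∈ l)
    (hq : q d = true) (hp : ¬ p d = true) : l.countP p < l.countP q := by
  induction l with
  | nil => exact absurd hd (List.not_mem_nil)
  | cons a t ih =>
    rw [List.countP_cons, List.countP_cons]
    rcases List.mem_cons.mp hd with rfl | hdt
    · have hle := List.countP_mono_left (fun x hx => himp x (List.mem_cons_of_mem _ hx))
      simp [hq, hp]; omega
    · have hlt := ih (fun x hx => himp x (List.mem_cons_of_mem _ hx)) hdt
      have : (if p a = true then 1 else 0) ≤ (if q a = true then 1 else 0) := by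
        split_ifs with h1 h2
        · rfl
        · exact absurd (himp a List.mem_cons_self h1) h2
        · omega
        · rfl
      omega

-- ===== VERDICT (by name: the statements are the Claim_ definitions above) =====
theorem solution_spec : Claim_unchanged_solution := by
  intro scores _ hpre hnD
  obtain ⟨hne, hlen⟩ := hpre
  obtain ⟨h, t, rfl⟩ : ∃ h t, scores = h :: t := by
    cases scores with
    | nil => exact absurd rfl hne
    | cons h t => exact ⟨h, t, rfl⟩
  unfold solution solution_alt
  simp only [PySem.List.pyGetD_zero_cons]
  set s := PySem.List.sorted2 (h :: t) (fun n => -(px n)) py with hsdef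
  have hperm := PySem.List.sorted2_perm (h :: t) (fun n => -(px n)) py false
  have hmem : ∀ x : List Int, x ∈ s ↔ x ∈ h :: t := fun x => hperm.mem_iff
  have hpair := sorted2_pairwise_keyLe (h :: t)
  by_cases hb : ∃ d ∈ s, px d > px h ∧ py d > py h
  · rw [if_pos hb, loopA_neg1 h s 0 1 hb]
  · rw [if_neg hb]
    have hw : ∀ d ∈ s, ¬(px d > px h ∧ py d > py h) := fun d hd hc => hb ⟨d, hd, hc⟩
    have hA := loopA_eq h s hpair hw s [] 1 rfl
    simp only [mrun, List.foldl_nil] at hA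
    rw [hA]
    apply PySem.List.foldl_congr_mem
    intro acc d hd
    by_cases h0 : 0 ≤ py d
    · have hiff : (d.sum > h.sum ∧ ¬(∃ e ∈ s, px e > px d ∧ py e > py d) ∧ 0 ≤ py d)
          ↔ (d.sum > h.sum ∧ ¬∃ e ∈ s, px e > px d ∧ py e > py d) := by tauto
      rw [if_congr hiff rfl rfl]
    · have hAfalse : ¬(d.sum > h.sum ∧ ¬(∃ e ∈ s, px e > px d ∧ py e > py d) ∧ 0 ≤ py d) :=
        fun hc => h0 hc.2.2
      have hBfalse : ¬(d.sum > h.sum ∧ ¬∃ e ∈ s, px e > px d ∧ py e > py d) := by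
        rintro ⟨hsum, hund⟩
        apply hnD
        refine ⟨List.cons_ne_nil _ _, ?_, d, (hmem d).mp hd, by omega, hsum, ?_⟩
        · intro e he; exact hw e ((hmem e).mpr he)
        · intro e he hc; exact hund ⟨e, (hmem e).mpr he, hc⟩
      rw [if_neg hAfalse, if_neg hBfalse]

theorem solution_changed : Claim_changed_solution := by unfold Claim_changed_solution; decide

theorem solution_tight : Claim_exact_solution := by
  intro scores _ hpre hD
  obtain ⟨hne, hlen⟩ := hpre
  obtain ⟨h, t, rfl⟩ : ∃ h t, scores = h :: t := by
    cases scores with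
    | nil => exact absurd rfl hne
    | cons h t => exact ⟨h, t, rfl⟩
  obtain ⟨_, hnodom, d0, hd0, hneg, hsum, hund⟩ := hD
  unfold solution solution_alt
  simp only [PySem.List.pyGetD_zero_cons]
  set s := PySem.List.sorted2 (h :: t) (fun n => -(px n)) py with hsdef
  have hperm := PySem.List.sorted2_perm (h :: t) (fun n => -(px n)) py false
  have hmem : ∀ x : List Int, x ∈ s ↔ x ∈ h :: t := fun x => hperm.mem_iff
  have hpair := sorted2_pairwise_keyLe (h :: t)
  have hb : ¬∃ d ∈ s, px d > px h ∧ py d > py h := by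
    rintro ⟨d, hd, hc⟩; exact hnodom d ((hmem d).mp hd) hc
  rw [if_neg hb]
  have hw : ∀ d ∈ s, ¬(px d > px h ∧ py d > py h) := fun d hd hc => hb ⟨d, hd, hc⟩
  have hA := loopA_eq h s hpair hw s [] 1 rfl
  simp only [mrun, List.foldl_nil] at hA
  rw [hA]
  rw [PySem.List.foldl_ite_add_one, PySem.List.foldl_ite_add_one]
  have hlt := countP_lt_countP
    (l := s)
    (p := fun d => decide (d.sum > h.sum ∧ ¬(∃ e ∈ s, px e > px d ∧ py e > py d) ∧ 0 ≤ py d))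
    (q := fun d => decide (d.sum > h.sum ∧ ¬∃ e ∈ s, px e > px d ∧ py e > py d))
    (by intro a _ ha; simp only [decide_eq_true_eq] at ha ⊢; exact ⟨ha.1, ha.2.1⟩)
    ((hmem d0).mpr hd0)
    (by simp only [decide_eq_true_eq]
        exact ⟨hsum, fun ⟨e, he, hc⟩ => hund e ((hmem e).mp he) hc⟩)
    (by simp only [decide_eq_true_eq]; intro hc; omega)
  omega
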